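-- pv_equiv track=rewrite | github.com/SimonHegele/SEA | sos.py | lexicographical_position
-- ===== SOURCE A (Python) =====
-- import math
--
-- def n_elements(bit_array):
--     count = 0
--     for i in range(len(bit_array)):
--         if bit_array[i]==1:
--             count+=1
--     return count
--
-- def lexicographical_position(a):
--     n = len(a)
--     k = n_elements(a)
--     lex_pos=0
--     for i in range(n):
--         if a[i] == 1:
--             lex_pos += math.comb(n-1,k)
--             n -= 1
--             k -= 1
--         else:
--             n -= 1
--             if(k==n):
--                 break
--     return(lex_pos)
-- ===== SOURCE B (Python) =====
-- import math
--
-- def lexicographical_position(a):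
--     # Combinatorial number system: the rank equals sum of C(d, j) over the
--     # ones, scanning from the right; d = distance from the end, j = ones seen.
--     pos = 0
--     ones = 0
--     for d, x in enumerate(reversed(a)):
--         if x == 1:
--             ones += 1
--             pos += math.comb(d, ones)
--     return pos
-- ===== Notes on version B (the rewrite author's own statement) =====
-- stated objective: alternative
-- what changed: B ranks via the combinatorial number system: one reverse scan adding C(d, j) for the j-th one found at distance d from the end, instead of A's left-to-right scan that maintains remaining length/weight and adds C(n-1,k) at every 1-bit.
import Mathlib
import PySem

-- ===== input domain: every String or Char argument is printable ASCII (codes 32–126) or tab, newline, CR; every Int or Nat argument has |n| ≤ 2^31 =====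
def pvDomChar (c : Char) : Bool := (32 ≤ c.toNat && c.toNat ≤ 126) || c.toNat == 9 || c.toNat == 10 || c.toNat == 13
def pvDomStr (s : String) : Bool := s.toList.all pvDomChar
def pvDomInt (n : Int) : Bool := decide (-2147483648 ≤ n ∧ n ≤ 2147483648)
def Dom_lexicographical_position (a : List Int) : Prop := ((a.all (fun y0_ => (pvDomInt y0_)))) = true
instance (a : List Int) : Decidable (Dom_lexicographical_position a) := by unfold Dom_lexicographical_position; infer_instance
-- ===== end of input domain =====

-- B ranks via the combinatorial number system (one reverse scan adding C(d, j) for the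
-- j-th one at distance d from the end) instead of A's left scan maintaining (n, k);
-- objective: alternative algorithm, same measured cost.

-- ===== PORT A =====
-- math.comb; exact for the nonnegative arguments A and B pass it.
def pyComb (n k : Int) : Int := (Nat.choose n.toNat k.toNat : Int)

-- helper n_elements of A: count of entries equal to 1
def n_elements (a : List Int) : Int :=
  a.foldl (fun count x => if x = 1 then count + 1 else count) 0

-- A's loop: state (n, k, lex_pos); the break is the early return
def lexAux : List Int → Int → Int → Int → Int
  | [], _, _, lex => lex
  | x :: rest, n, k, lex =>
    if x = 1 then lexAux rest (n - 1) (k - 1) (lex + pyComb (n - 1) k)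
    else if k = n - 1 then lex
    else lexAux rest (n - 1) k lex

def lexicographical_position (a : List Int) : Int :=
  lexAux a (PySem.List.len a) (n_elements a) 0

-- ===== PORT B =====
-- Source B's loop body: state (pos, ones); dx = (d, x) from enumerate(reversed(a))
def bStep (st : Int × Int) (dx : Int × Int) : Int × Int :=
  if dx.2 = 1 then (st.1 + pyComb dx.1 (st.2 + 1), st.2 + 1) else st

def lexicographical_position_alt (a : List Int) : Int :=
  ((PySem.List.enumerate a.reverse 0).foldl bStep (0, 0)).1

-- ===== PRECONDITION & SPEC =====
def Spec_lexicographical_position (a : List Int) (out : Int) : Prop := out = lexicographical_position_alt a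
instance (a : List Int) (out : Int) : Decidable (Spec_lexicographical_position a out) := by unfold Spec_lexicographical_position; infer_instance

-- ===== CLAIM (what is proved, stated in full; the proofs are below) =====
def Claim_equal_lexicographical_position : Prop := ∀ (a : List Int), Dom_lexicographical_position a → Spec_lexicographical_position a (lexicographical_position a)

-- ===== LEMMAS AND PROOFS =====

-- count of ones as a Nat
def cnt (l : List Int) : Nat := l.countP (fun x => decide (x = 1))

lemma n_elements_eq (a : List Int) : n_elements a = (cnt a : Int) := by
  simpa [n_elements, cnt] using PySem.List.foldl_count_if (fun x : Int => decide (x = 1)) a 0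

-- the pos component of bStep accumulates additively
lemma bStep_fold_shift (l : List (Int × Int)) (p q c : Int) :
    l.foldl bStep (p + q, c) = ((l.foldl bStep (p, c)).1 + q, (l.foldl bStep (p, c)).2) := by
  induction l generalizing p c with
  | nil => rfl
  | cons dx t ih =>
    simp only [List.foldl_cons, bStep]
    by_cases hx : dx.2 = 1
    · rw [if_pos hx, if_pos hx, show p + q + pyComb dx.1 (c + 1) = (p + pyComb dx.1 (c + 1)) + q by ring]
      exact ih _ _
    · rw [if_neg hx, if_neg hx]; exact ih _ _

-- the ones component counts the pairs whose value is 1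
lemma bStep_fold_snd (l : List (Int × Int)) (p c : Int) :
    (l.foldl bStep (p, c)).2 = c + (l.countP (fun dx => decide (dx.2 = 1)) : Int) := by
  induction l generalizing p c with
  | nil => simp
  | cons dx t ih =>
    simp only [List.foldl_cons, bStep, List.countP_cons]
    by_cases hx : dx.2 = 1
    · rw [if_pos hx, ih]; simp [hx]; ring
    · rw [if_neg hx, ih]; simp [hx]

lemma countP_enumerate (l : List Int) (s : Int) :
    (PySem.List.enumerate l s).countP (fun dx => decide (dx.2 = 1)) = cnt l := by
  induction l generalizing s with
  | nil => simp [PySem.List.enumerate_nil, cnt]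
  | cons x t ih => simp [PySem.List.enumerate_cons, List.countP_cons, cnt, ih]

-- continuing A's loop on an all-ones tail adds nothing (the break is only a shortcut)
lemma lexAux_all_ones (l : List Int) (lex : Int) (h : ∀ x ∈ l, x = 1) :
    lexAux l (l.length : Int) (l.length : Int) lex = lex := by
  induction l with
  | nil => rfl
  | cons x t ih =>
    have hx : x = 1 := h x (List.mem_cons_self ..)
    have hlen : ((x :: t).length : Int) = (t.length : Int) + 1 := by simp
    rw [lexAux, if_pos hx, hlen,
        show ((t.length : Int) + 1) - 1 = (t.length : Int) from by ring]
    have hc : pyComb ((t.length : Nat) : Int) ((t.length : Int) + 1) = 0 := by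
      rw [show ((t.length : Int) + 1) = ((t.length + 1 : Nat) : Int) from by push_cast; ring]
      simp [pyComb]
    rw [hc, add_zero]
    exact ih (fun y hy => h y (List.mem_cons_of_mem _ hy))

-- main invariant: A's loop on a with its own length/count equals B's reverse fold
lemma main_lemma (a : List Int) (lex : Int) :
    lexAux a (a.length : Int) (cnt a : Int) lex
      = ((PySem.List.enumerate a.reverse 0).foldl bStep (lex, 0)).1 := by
  induction a generalizing lex with
  | nil => simp [lexAux, PySem.List.enumerate_nil]
  | cons x t ih =>
    have hrev : (x :: t).reverse = t.reverse ++ [x] := by simp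
    have hlen : ((x :: t).length : Int) = (t.length : Int) + 1 := by simp
    have henum : PySem.List.enumerate ((x :: t).reverse) 0
        = PySem.List.enumerate t.reverse 0 ++ [((t.length : Int), x)] := by
      rw [hrev, PySem.List.enumerate_append]
      simp [PySem.List.enumerate_cons, PySem.List.enumerate_nil]
    have hsnd : ((PySem.List.enumerate t.reverse 0).foldl bStep (lex, 0)).2 = (cnt t : Int) := by
      rw [bStep_fold_snd]
      have : (PySem.List.enumerate t.reverse 0).countP (fun dx => decide (dx.2 = 1)) = cnt t := by
        rw [countP_enumerate]
        simp [cnt, List.countP_reverse]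
      rw [this]; ring
    rw [henum, List.foldl_append]
    simp only [List.foldl_cons, List.foldl_nil]
    by_cases hx : x = 1
    · -- head is a one: both sides gain pyComb (len t) (cnt t + 1)
      have hcnt : (cnt (x :: t) : Int) = (cnt t : Int) + 1 := by simp [cnt, hx]
      rw [lexAux, if_pos hx, hlen, hcnt,
          show ((t.length : Int) + 1) - 1 = (t.length : Int) from by ring,
          show ((cnt t : Int) + 1) - 1 = (cnt t : Int) from by ring,
          ih (lex + pyComb (t.length : Int) ((cnt t : Int) + 1))]
      rw [show (lex + pyComb (t.length : Int) ((cnt t : Int) + 1), (0 : Int))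
            = (((lex : Int) + pyComb (t.length : Int) ((cnt t : Int) + 1)), (0 : Int)) from rfl]
      rw [bStep_fold_shift]
      simp [bStep, hx, hsnd]
    · have hcnt : (cnt (x :: t) : Int) = (cnt t : Int) := by simp [cnt, hx]
      rw [lexAux, if_neg hx, hlen, hcnt,
          show ((t.length : Int) + 1) - 1 = (t.length : Int) from by ring]
      simp only [bStep, hx, if_false]
      by_cases hb : (cnt t : Int) = (t.length : Int)
      · rw [if_pos hb]
        have hall : ∀ y ∈ t, y = 1 := by
          intro y hy
          have : cnt t = t.length := by exact_mod_cast hb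
          exact of_decide_eq_true (List.countP_eq_length.mp this y hy)
        have := ih lex
        rw [show (cnt t : Int) = (t.length : Int) from hb] at this
        rw [← this, lexAux_all_ones t lex hall]
      · rw [if_neg hb]
        exact ih lex

-- ===== VERDICT (by name: the statement is the Claim_ definition above) =====
theorem lexicographical_position_spec : Claim_equal_lexicographical_position := by
  intro a _
  unfold Spec_lexicographical_position lexicographical_position lexicographical_position_alt
  simp only [PySem.List.len_eq, n_elements_eq]
  exact main_lemma a 0
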